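-- pv_equiv track=rewrite | github.com/matheusphalves/algorithm-toolbox | week03 - greedy_algorithms/06numberPrizes.py | maxPrizeSequence
-- ===== SOURCE A (Python) =====
-- def maxPrizeSequence(number):
--     list = [0]
--     sum = 0;
--     while(sum<=number):
--         step = 1
--         actualValue = list[-1] + step
--         actualSum = sum + actualValue
--         if(actualSum<=number):
--             list.append(actualValue)
--             sum += list[-1]
--             if(sum==number):
--                 break
--             if (actualSum + (actualValue + 1) > number):
--                 step = 0
--                 while(actualSum + step <number):
--                     step +=1
--                 list[-1] = (actualValue + step)
--                 sum += list[-1]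
--     list.remove(0)
--     return list
-- ===== SOURCE B (Python) =====
-- def maxPrizeSequence(number):
--     if number <= 0:
--         return []
--     k = 1
--     while (k + 1) * (k + 2) // 2 <= number:
--         k += 1
--     res = list(range(1, k + 1))
--     res[-1] += number - k * (k + 1) // 2
--     return res
-- ===== Notes on version B (the rewrite author's own statement) =====
-- stated objective: simpler
-- what changed: Replaces A's step-by-step build-and-absorb loop over a growing list (with an inner unit-increment search that folds the remainder into the last element) by a direct computation: find the largest k whose triangular number fits within number by a simple counter loop, emit the sequence one..k and add the remainder to the last element.
-- outside the precondition, e.g. on maxPrizeSequence(0): A does not finish within the time limit, B returns []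
import Mathlib
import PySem

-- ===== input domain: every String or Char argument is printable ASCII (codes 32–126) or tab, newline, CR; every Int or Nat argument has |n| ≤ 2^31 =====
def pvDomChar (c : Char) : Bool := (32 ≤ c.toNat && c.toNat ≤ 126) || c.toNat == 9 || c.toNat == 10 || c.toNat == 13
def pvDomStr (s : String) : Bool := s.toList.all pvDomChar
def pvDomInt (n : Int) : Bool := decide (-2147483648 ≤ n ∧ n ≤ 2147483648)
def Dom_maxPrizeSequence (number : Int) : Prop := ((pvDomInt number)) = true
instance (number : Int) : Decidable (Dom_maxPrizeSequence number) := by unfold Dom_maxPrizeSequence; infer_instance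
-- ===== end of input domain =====

-- B replaces A's build-and-absorb loop by computing the largest k whose triangular number
-- fits within the input and adding the remainder to the last element (objective: simpler).
-- A loops forever on input zero; Pre_ excludes exactly that input (B returns the empty list there).

-- ===== PORT A =====
-- termination measure lemma for the inner while loop (cited in decreasing_by)
theorem pvInner_dec (number a s : Int) (h : a + s < number) :
    (number - a - (s + 1)).toNat < (number - a - s).toNat := by
  have hb : 0 < number - a - s := by rw [sub_sub]; exact Int.sub_pos.mpr h
  refine (Int.toNat_lt_toNat hb).mpr ?_
  rw [sub_sub, sub_sub]
  exact sub_lt_sub_left (Int.add_lt_add_left (lt_add_one s) a) number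

-- inner 'while(actualSum + step < number): step += 1'
def pvInnerStep (number actualSum step : Int) : Int :=
  if actualSum + step < number then pvInnerStep number actualSum (step + 1) else step
termination_by (number - actualSum - step).toNat
decreasing_by exact pvInner_dec number actualSum step (by assumption)

-- the outer 'while(sum <= number)' loop; fuel only makes the recursion total (A diverges
-- exactly on number == 0, which Pre_ excludes; elsewhere the fuel given below suffices)
def pvLoopA (number : Int) : Nat → List Int → Int → List Int
  | 0, lst, _ => lst
  | fuel + 1, lst, sum =>
    if sum ≤ number then
      let step : Int := 1
      let actualValue := (PySem.List.pyGet? lst (-1)).getD 0 + step   -- list[-1]; lst is never empty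
      let actualSum := sum + actualValue
      if actualSum ≤ number then
        let lst2 := lst ++ [actualValue]
        let sum2 := sum + actualValue
        if sum2 = number then lst2
        else if actualSum + (actualValue + 1) > number then
          let st := pvInnerStep number actualSum 0
          let lst3 := lst2.dropLast ++ [actualValue + st]             -- list[-1] = actualValue + step
          let sum3 := sum2 + (actualValue + st)
          pvLoopA number fuel lst3 sum3
        else pvLoopA number fuel lst2 sum2
      else pvLoopA number fuel lst sum
    else lst

def maxPrizeSequence (number : Int) : List Int :=
  (PySem.List.remove? (pvLoopA number (number.toNat + 2) [0] 0) 0).getD []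

-- ===== PORT B =====
-- triangular numbers, used by findK's termination proof (cited in decreasing_by)
def pvTri : Nat → Int
  | 0 => 0
  | m + 1 => pvTri m + ((m : Int) + 1)

theorem pvTwo_mul_tri (m : Nat) : 2 * pvTri m = (m : Int) * ((m : Int) + 1) := by
  induction m with
  | zero => decide
  | succ m ih =>
    show 2 * (pvTri m + ((m : Int) + 1)) = ((m + 1 : Nat) : Int) * (((m + 1 : Nat) : Int) + 1)
    rw [Nat.cast_succ, mul_add, ih]
    ring

theorem pvTri_floordiv (k : Nat) :
    PySem.Int.floordiv ((k : Int) * ((k : Int) + 1)) 2 = pvTri k := by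
  rw [← pvTwo_mul_tri, PySem.Int.floordiv_eq_ediv_of_pos (by decide)]
  exact Int.mul_ediv_cancel_left _ (by decide)

theorem pvTri_ge (m : Nat) : (m : Int) ≤ pvTri m := by
  induction m with
  | zero => decide
  | succ m ih =>
    calc ((m + 1 : Nat) : Int) = (m : Int) + 1 := Nat.cast_succ m
      _ ≤ pvTri m + 1 := Int.add_le_add_right ih 1
      _ ≤ pvTri m + ((m : Int) + 1) := by
          refine Int.add_le_add_left ?_ (pvTri m)
          have h1 := Int.add_le_add_right (Int.natCast_nonneg m) 1
          rwa [Int.zero_add] at h1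
      _ = pvTri (m + 1) := rfl

-- termination measure lemma for the k-search loop (cited in decreasing_by)
theorem pvFindK_dec (number : Int) (k : Nat)
    (h : PySem.Int.floordiv (((k : Int) + 1) * ((k : Int) + 2)) 2 ≤ number) :
    (number - ((k + 1 : Nat) : Int)).toNat < (number - (k : Int)).toNat := by
  have h2 : PySem.Int.floordiv (((k + 1 : Nat) : Int) * (((k + 1 : Nat) : Int) + 1)) 2 = pvTri (k + 1) :=
    pvTri_floordiv (k + 1)
  rw [Nat.cast_succ, add_assoc, (by decide : (1 : Int) + 1 = 2)] at h2
  rw [h2] at h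
  have h3 : ((k + 1 : Nat) : Int) ≤ number := le_trans (pvTri_ge (k + 1)) h
  have hk1 : (k : Int) + 1 ≤ number := by rw [← Nat.cast_succ]; exact h3
  have hb : 0 < number - (k : Int) :=
    Int.sub_pos.mpr (lt_of_lt_of_le (lt_add_one (k : Int)) hk1)
  refine (Int.toNat_lt_toNat hb).mpr ?_
  refine sub_lt_sub_left ?_ number
  rw [Nat.cast_succ]
  exact lt_add_one _

-- 'while (k+1)*(k+2)//2 <= number: k += 1'
def pvFindK (number : Int) (k : Nat) : Nat :=
  if PySem.Int.floordiv (((k : Int) + 1) * ((k : Int) + 2)) 2 ≤ number then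
    pvFindK number (k + 1)
  else k
termination_by (number - k).toNat
decreasing_by exact pvFindK_dec number k (by assumption)

def maxPrizeSequence_alt (number : Int) : List Int :=
  if number ≤ 0 then []
  else
    let k := pvFindK number 1
    let res := PySem.List.pyRange 1 ((k : Int) + 1) 1                 -- list(range(1, k+1))
    -- res[-1] += number - k*(k+1)//2  (res is nonempty since k ≥ 1)
    res.dropLast ++
      [(PySem.List.pyGet? res (-1)).getD 0 +
        (number - PySem.Int.floordiv ((k : Int) * ((k : Int) + 1)) 2)]

-- ===== PRECONDITION & SPEC =====
-- Pre_ excludes only number = 0, where A's outer while loop never terminates (it diverges).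
def Pre_maxPrizeSequence (number : Int) : Prop := number ≠ 0
instance (number : Int) : Decidable (Pre_maxPrizeSequence number) := by
  unfold Pre_maxPrizeSequence; infer_instance

def pvWitness_maxPrizeSequence : Int := (10)

def Spec_maxPrizeSequence (number : Int) (out : List Int) : Prop := out = maxPrizeSequence_alt number
instance (number : Int) (out : List Int) : Decidable (Spec_maxPrizeSequence number out) := by
  unfold Spec_maxPrizeSequence; infer_instance

-- ===== CLAIM (what is proved, stated in full; the proofs are below) =====
def Claim_equal_maxPrizeSequence : Prop := ∀ (number : Int), Dom_maxPrizeSequence number → Pre_maxPrizeSequence number → Spec_maxPrizeSequence number (maxPrizeSequence number)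

-- ===== LEMMAS AND PROOFS =====

theorem pvTri_nonneg (m : Nat) : 0 ≤ pvTri m := by
  induction m with
  | zero => simp [pvTri]
  | succ m ih => simp only [pvTri]; omega


-- [1, 2, ..., m] as B builds it
def pvOlist (m : Nat) : List Int := PySem.List.pyRange 1 ((m : Int) + 1) 1
-- A's working list [0, 1, ..., m]
def pvZlist (m : Nat) : List Int := (0 : Int) :: pvOlist m

theorem pvOlist_zero : pvOlist 0 = [] := by
  simp [pvOlist, PySem.List.pyRange_one_eq_nil]

theorem pvOlist_succ (m : Nat) : pvOlist (m + 1) = pvOlist m ++ [(m : Int) + 1] := by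
  unfold pvOlist
  push_cast
  rw [show (m : Int) + 1 + 1 = ((m : Int) + 1) + 1 from rfl]
  rw [PySem.List.pyRange_one_succ_right (a := 1) (b := (m : Int) + 1) (by omega)]

theorem pvZlist_succ (m : Nat) : pvZlist (m + 1) = pvZlist m ++ [(m : Int) + 1] := by
  simp [pvZlist, pvOlist_succ]

theorem pvZlist_last (m : Nat) : (PySem.List.pyGet? (pvZlist m) (-1)).getD 0 = (m : Int) := by
  cases m with
  | zero => simp [pvZlist, pvOlist_zero, PySem.List.pyGet?_neg_one]
  | succ m =>
    rw [pvZlist_succ, PySem.List.pyGet?_neg_one_append_singleton]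
    simp

theorem pvTri_mono {j k : Nat} (h : j ≤ k) : pvTri j ≤ pvTri k := by
  induction k with
  | zero =>
    have : j = 0 := by omega
    subst this; exact le_refl _
  | succ k ih =>
    rcases Nat.lt_or_ge j (k + 1) with h2 | h2
    · have := ih (by omega); simp only [pvTri]; omega
    · have : j = k + 1 := by omega
      subst this; omega

theorem pvFindK_eq (number : Int) (m : Nat)
    (hA : pvTri (m + 1) ≤ number) (hB : number < pvTri (m + 2)) :
    ∀ (d j : Nat), j + d = m + 1 → pvFindK number j = m + 1 := by
  intro d
  induction d with
  | zero =>
    intro j hj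
    have hj' : j = m + 1 := by omega
    subst hj'
    unfold pvFindK
    have h2 : PySem.Int.floordiv ((((m+2 : Nat)) : Int) * ((((m+2 : Nat)) : Int) + 1)) 2 = pvTri (m + 2) :=
      pvTri_floordiv (m + 2)
    push_cast at h2
    have : ¬ PySem.Int.floordiv (((m : Int) + 1 + 1) * ((m : Int) + 1 + 2)) 2 ≤ number := by
      rw [show ((m : Int) + 1 + 1) * ((m : Int) + 1 + 2) = ((m : Int) + 2) * ((m : Int) + 2 + 1) by ring, h2]
      omega
    push_cast
    rw [if_neg this]
  | succ d ih =>
    intro j hj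
    unfold pvFindK
    have h2 : PySem.Int.floordiv ((((j+1 : Nat)) : Int) * ((((j+1 : Nat)) : Int) + 1)) 2 = pvTri (j + 1) :=
      pvTri_floordiv (j + 1)
    push_cast at h2
    have hle : pvTri (j + 1) ≤ pvTri (m + 1) := pvTri_mono (by omega)
    have : PySem.Int.floordiv (((j : Int) + 1) * ((j : Int) + 2)) 2 ≤ number := by
      rw [show ((j : Int) + 1) * ((j : Int) + 2) = ((j : Int) + 1) * ((j : Int) + 1 + 1) by ring, h2]
      omega
    rw [if_pos this]
    exact ih (j + 1) (by omega)

theorem pvAlt_eq (number : Int) (m : Nat)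
    (h1 : pvTri (m + 1) ≤ number) (h2 : number < pvTri (m + 2)) :
    maxPrizeSequence_alt number = pvOlist m ++ [((m : Int) + 1) + (number - pvTri (m + 1))] := by
  have hpos : ¬ number ≤ 0 := by
    have := pvTri_ge (m + 1); push_cast at this; omega
  unfold maxPrizeSequence_alt
  rw [if_neg hpos]
  have hk : pvFindK number 1 = m + 1 := pvFindK_eq number m h1 h2 m 1 (by omega)
  rw [hk]
  dsimp only
  have hres : PySem.List.pyRange 1 (((m + 1 : Nat) : Int) + 1) 1 = pvOlist (m + 1) := rfl
  rw [hres, pvOlist_succ]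
  have hflo : PySem.Int.floordiv (((m + 1 : Nat) : Int) * (((m + 1 : Nat) : Int) + 1)) 2 = pvTri (m + 1) :=
    pvTri_floordiv (m + 1)
  rw [hflo, PySem.List.pyGet?_neg_one_append_singleton]
  simp

theorem pvInnerStep_eq (number a : Int) (s : Int) (h : s ≤ number - a) :
    pvInnerStep number a s = number - a := by
  by_cases hlt : a + s < number
  · unfold pvInnerStep; rw [if_pos hlt]
    exact pvInnerStep_eq number a (s + 1) (by omega)
  · unfold pvInnerStep; rw [if_neg hlt]
    omega
termination_by (number - a - s).toNat
decreasing_by exact pvInner_dec number a s hlt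

theorem pvLoopA_gt (number : Int) (fuel : Nat) (lst : List Int) (sum : Int)
    (h : number < sum) (hf : 1 ≤ fuel) : pvLoopA number fuel lst sum = lst := by
  cases fuel with
  | zero => omega
  | succ fuel => rw [pvLoopA, if_neg (by omega)]

theorem pvLoopA_eq (number : Int) : ∀ (fuel m : Nat),
    pvTri (m + 1) ≤ number →
    (number - pvTri m).toNat + 2 ≤ fuel →
    pvLoopA number fuel (pvZlist m) (pvTri m) = (0 : Int) :: maxPrizeSequence_alt number := by
  intro fuel
  induction fuel with
  | zero => intro m _ hf; omega
  | succ fuel ih =>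
    intro m hm hf
    have htm : pvTri (m + 1) = pvTri m + ((m : Int) + 1) := rfl
    have htm2 : pvTri (m + 2) = pvTri (m + 1) + ((m : Int) + 2) := by
      show pvTri (m + 2) = pvTri (m + 1) + (((m + 1 : Nat) : Int) + 1)
      push_cast [pvTri]; ring
    rw [pvLoopA]
    rw [if_pos (by omega)]
    simp only [pvZlist_last]
    rw [if_pos (by omega : pvTri m + ((m : Int) + 1) ≤ number)]
    by_cases hbreak : pvTri m + ((m : Int) + 1) = number
    · rw [if_pos hbreak]
      rw [pvAlt_eq number m (by omega) (by omega)]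
      rw [show ((m : Int) + 1) + (number - pvTri (m + 1)) = (m : Int) + 1 by omega]
      rw [← pvOlist_succ, ← pvZlist_succ]
      rfl
    · rw [if_neg hbreak]
      by_cases habs : pvTri m + ((m : Int) + 1) + (((m : Int) + 1) + 1) > number
      · rw [if_pos habs]
        have hst : pvInnerStep number (pvTri m + ((m : Int) + 1)) 0 = number - pvTri (m + 1) := by
          rw [htm]; exact pvInnerStep_eq _ _ 0 (by omega)
        rw [hst]
        rw [pvLoopA_gt _ _ _ _ (by omega) (by omega)]
        rw [pvAlt_eq number m (by omega) (by omega)]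
        have : (pvZlist m ++ [(m : Int) + 1]).dropLast = pvZlist m := by
          simp
        rw [this]
        simp [pvZlist]
      · rw [if_neg habs]
        have hnn := pvTri_nonneg m
        have he : pvTri (m + 1 + 1) = pvTri (m + 2) := rfl
        have hrec := ih (m + 1) (by omega) (by omega)
        rw [← pvZlist_succ, show pvTri m + ((m : Int) + 1) = pvTri (m + 1) from (htm).symm]
        exact hrec

-- ===== VERDICT (by name: the statement is the Claim_ definition above) =====
theorem maxPrizeSequence_spec : Claim_equal_maxPrizeSequence := by
  intro number _ hpre
  unfold Spec_maxPrizeSequence maxPrizeSequence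
  rcases lt_or_gt_of_ne hpre with hneg | hpos
  · -- number < 0 : loop body never runs, result []
    rw [pvLoopA_gt number _ _ _ (by omega) (by omega)]
    unfold maxPrizeSequence_alt
    rw [if_pos (by omega)]
    simp
  · -- number ≥ 1 : start the invariant at m = 0
    have h0 : pvLoopA number (number.toNat + 2) (pvZlist 0) (pvTri 0) =
        (0 : Int) :: maxPrizeSequence_alt number := by
      apply pvLoopA_eq
      · show pvTri 1 ≤ number
        simp only [pvTri]
        push_cast
        omega
      · simp only [pvTri]
        omega
    have hz : pvZlist 0 = [0] := by simp [pvZlist, pvOlist_zero]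
    have ht : pvTri 0 = 0 := rfl
    rw [hz, ht] at h0
    rw [h0]
    simp
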